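-- pv_equiv track=rewrite | github.com/AnnLad15/FormalLanguageTheory | Lab1/invariants.py | count_blocks_by_leter
-- ===== SOURCE A (Python) =====
-- def count_blocks_by_leter(word: str, leter='x'):
--     """
--     Функция подсчета общее количество блоков, количество блоков нечетной и четной длины
--     """
--     if not word:
--         return 0, 0, 0  # пустое слово → 0 блоков, чётность 0
--
--     block_count = 0  # первый блок уже есть
--     block_len = 0
--     prev = word[0]
--     block_count_odd = 0
--     if prev == leter:
--         block_len = 1
--
--     for ch in word[1:]+".":
--         if ch == leter:
--             if ch != prev:
--                 block_len = 1
--             else: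
--                 block_len += 1
--         else:
--             if prev == leter:
--                 block_count_odd += block_len % 2
--                 block_count += 1
--                 block_len = 0
--         prev = ch
--
--     return block_count, block_count_odd, block_count - block_count_odd
-- ===== SOURCE B (Python) =====
-- def count_blocks_by_leter(word: str, leter='x'):
--     """
--     Функция подсчета общее количество блоков, количество блоков нечетной и четной длины
--     """
--     total = odd = 0
--     i, n = 0, len(word)
--     while i < n:
--         j = i
--         while j < n and word[j] == word[i]:
--             j += 1
--         if word[i] == leter:
--             total += 1
--             odd += (j - i) % 2
--         i = j
--     return total, odd, total - odd
-- ===== Notes on version B (the rewrite author's own statement) =====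
-- stated objective: simpler
-- what changed: B scans the word run by run with a two-pointer inner loop (materialising each maximal block and tallying it at once) instead of A's char-by-char state machine with prev/block_len bookkeeping and an appended dot sentinel.
-- intended difference: When leter is the dot character and the word ends in a dot, A's appended dot sentinel merges with the word's final block of dots so A never counts that block (its block_count is one too small); B counts it, which is the intended value since that final run is a real block. — e.g. on count_blocks_by_leter(".", "."): A returns (0, 0, 0), B returns (1, 1, 0)
import Mathlib
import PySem

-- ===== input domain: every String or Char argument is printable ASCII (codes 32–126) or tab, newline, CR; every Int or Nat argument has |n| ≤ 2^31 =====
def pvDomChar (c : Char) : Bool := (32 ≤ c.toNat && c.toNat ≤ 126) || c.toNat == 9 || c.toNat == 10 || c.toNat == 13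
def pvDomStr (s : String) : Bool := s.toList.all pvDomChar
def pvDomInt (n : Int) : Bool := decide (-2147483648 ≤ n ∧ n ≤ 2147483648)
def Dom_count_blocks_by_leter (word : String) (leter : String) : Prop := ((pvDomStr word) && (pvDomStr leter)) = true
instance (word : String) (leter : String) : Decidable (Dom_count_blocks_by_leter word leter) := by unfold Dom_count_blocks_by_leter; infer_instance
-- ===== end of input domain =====

-- B replaces A's char-by-char prev/block_len state machine (with its appended dot sentinel)
-- by a run-by-run two-pointer scan; simpler, and B counts the final block even when leter is
-- the dot character (stated as the intended difference D_ below).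

-- ===== PORT A =====
-- A's loop body; state st = (block_count, block_count_odd, block_len, prev)
def pvStepA (leter : String) (st : Int × Int × Int × Char) (ch : Char) : Int × Int × Int × Char :=
  if String.ofList [ch] = leter then
    if ch ≠ st.2.2.2 then (st.1, st.2.1, 1, ch) else (st.1, st.2.1, st.2.2.1 + 1, ch)
  else
    if String.ofList [st.2.2.2] = leter then
      (st.1 + 1, st.2.1 + PySem.Int.mod st.2.2.1 2, 0, ch)
    else (st.1, st.2.1, st.2.2.1, ch)

def count_blocks_by_leter (word : String) (leter : String) : Int × Int × Int :=
  match word.toList with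
  | [] => (0, 0, 0)
  | p :: rest =>
    let bl0 : Int := if String.ofList [p] = leter then 1 else 0
    let r := (rest ++ ['.']).foldl (pvStepA leter) (0, 0, bl0, p)
    (r.1, r.2.1, r.1 - r.2.1)

-- ===== PORT B =====
-- B's outer while-loop: at each position take the maximal run (the inner while loop,
-- rendered as takeWhile/dropWhile) and tally it at once
def pvGoB (leter : String) : List Char → Int → Int → Int × Int
  | [], t, o => (t, o)
  | c :: rest, t, o =>
    let run := rest.takeWhile (fun x => x == c)
    let rest' := rest.dropWhile (fun x => x == c)
    if String.ofList [c] = leter then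
      pvGoB leter rest' (t + 1) (o + PySem.Int.mod (1 + (run.length : Int)) 2)
    else
      pvGoB leter rest' t o
  termination_by cs => cs.length
  decreasing_by
    all_goals
      have h := List.length_dropWhile_le (p := fun x => x == c) (l := rest)
      simp only [List.length_cons]; omega

def count_blocks_by_leter_alt (word : String) (leter : String) : Int × Int × Int :=
  let r := pvGoB leter word.toList 0 0
  (r.1, r.2, r.1 - r.2)

-- ===== PRECONDITION & SPEC =====
-- When leter is the dot character and the word ends in a dot, A's appended dot sentinel merges
-- with the word's final block of dots so A never counts that block (its block_count is one too
-- small); B counts it, which is the intended value since that final run is a real block.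
def D_count_blocks_by_leter (word : String) (leter : String) : Prop :=
  leter = "." ∧ word.toList.getLast? = some '.'
instance (word : String) (leter : String) : Decidable (D_count_blocks_by_leter word leter) := by
  unfold D_count_blocks_by_leter; infer_instance

def Spec_count_blocks_by_leter (word : String) (leter : String) (out : Int × Int × Int) : Prop :=
  ¬ D_count_blocks_by_leter word leter → out = count_blocks_by_leter_alt word leter
instance (word : String) (leter : String) (out : Int × Int × Int) : Decidable (Spec_count_blocks_by_leter word leter out) := by
  unfold Spec_count_blocks_by_leter; infer_instance

def pvDiffWitness_count_blocks_by_leter : String × String := (".", ".")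
def pvDiffWitnessOut_count_blocks_by_leter : (Int × Int × Int) × (Int × Int × Int) :=
  ((0, 0, 0), (1, 1, 0))

-- ===== CLAIM (what is proved, stated in full; the proofs are below) =====
def Claim_unchanged_count_blocks_by_leter : Prop := ∀ (word : String) (leter : String), Dom_count_blocks_by_leter word leter → Spec_count_blocks_by_leter word leter (count_blocks_by_leter word leter)
def Claim_changed_count_blocks_by_leter : Prop := Dom_count_blocks_by_leter (pvDiffWitness_count_blocks_by_leter.1) (pvDiffWitness_count_blocks_by_leter.2) ∧ D_count_blocks_by_leter (pvDiffWitness_count_blocks_by_leter.1) (pvDiffWitness_count_blocks_by_leter.2) ∧ count_blocks_by_leter (pvDiffWitness_count_blocks_by_leter.1) (pvDiffWitness_count_blocks_by_leter.2) = pvDiffWitnessOut_count_blocks_by_leter.1 ∧ count_blocks_by_leter_alt (pvDiffWitness_count_blocks_by_leter.1) (pvDiffWitness_count_blocks_by_leter.2) = pvDiffWitnessOut_count_blocks_by_leter.2 ∧ pvDiffWitnessOut_count_blocks_by_leter.1 ≠ pvDiffWitnessOut_count_blocks_by_leter.2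
def Claim_exact_count_blocks_by_leter : Prop := ∀ (word : String) (leter : String), Dom_count_blocks_by_leter word leter → D_count_blocks_by_leter word leter → count_blocks_by_leter word leter ≠ count_blocks_by_leter_alt word leter

-- ===== LEMMAS AND PROOFS =====

-- first two components (block_count, block_count_odd) of A's loop state
def pvFst2 (x : Int × Int × Int × Char) : Int × Int := (x.1, x.2.1)

theorem pv_mk_inj {a b : Char} (h : String.ofList [a] = String.ofList [b]) : a = b := by
  have := congrArg String.toList h
  simpa using this

-- B skips a non-matching character: grouping its run or skipping one-by-one agree
theorem pv_skip (leter : String) (c : Char) (rest : List Char) (t o : Int)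
    (hc : ¬ String.ofList [c] = leter) :
    pvGoB leter (c :: rest) t o = pvGoB leter rest t o := by
  rw [pvGoB]
  simp only [hc, if_false]
  cases rest with
  | nil => simp
  | cons x r2 =>
    by_cases hx : x = c
    · subst hx
      rw [pvGoB]
      simp [hc]
    · simp [hx]

-- joint induction: A's loop (with the appended dot sentinel) computes B's run tally.
-- N-part: current prev non-matching; M-part: prev matching with pending block length k;
-- the last hypothesis says the sentinel, if it matches leter, follows a non-matching char.
theorem pv_main (leter : String) : ∀ (n : Nat) (cs : List Char), cs.length ≤ n →
    (∀ (bc bo bl : Int) (prev : Char), ¬ String.ofList [prev] = leter →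
      (String.ofList ['.'] = leter → cs = [] ∨ ∃ d, cs.getLast? = some d ∧ ¬ String.ofList [d] = leter) →
      pvFst2 ((cs ++ ['.']).foldl (pvStepA leter) (bc, bo, bl, prev)) = pvGoB leter cs bc bo)
    ∧ (∀ (bc bo k : Int) (c : Char), String.ofList [c] = leter →
      (String.ofList ['.'] = leter → ∃ d, cs.getLast? = some d ∧ ¬ String.ofList [d] = leter) →
      pvFst2 ((cs ++ ['.']).foldl (pvStepA leter) (bc, bo, k, c)) =
        pvGoB leter (cs.dropWhile (fun x => x == c)) (bc + 1)
          (bo + PySem.Int.mod (k + ((cs.takeWhile (fun x => x == c)).length : Int)) 2)) := by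
  intro n
  induction n with
  | zero =>
    intro cs hlen
    have : cs = [] := List.eq_nil_of_length_eq_zero (Nat.le_zero.mp hlen)
    subst this
    constructor
    · intro bc bo bl prev hprev _
      by_cases hs : String.ofList ['.'] = leter
      · -- sentinel matches, prev does not: block_len := 1, nothing counted
        have hne : ('.' : Char) ≠ prev := fun h => hprev (h ▸ hs)
        simp [pvStepA, hs, hne, pvGoB, pvFst2]
      · simp [pvStepA, hs, hprev, pvGoB, pvFst2]
    · intro bc bo k c hc hok
      -- cs = [] and prev matches: sentinel must be non-matching, block closes
      have hs : ¬ String.ofList ['.'] = leter := by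
        intro hs; rcases hok hs with ⟨d, hd, _⟩; simp at hd
      simp [pvStepA, hs, hc, pvGoB, pvFst2]
  | succ n ih =>
    intro cs hlen
    constructor
    · -- N part
      intro bc bo bl prev hprev hok
      cases cs with
      | nil =>
        by_cases hs : String.ofList ['.'] = leter
        · have hne : ('.' : Char) ≠ prev := fun h => hprev (h ▸ hs)
          simp [pvStepA, hs, hne, pvGoB, pvFst2]
        · simp [pvStepA, hs, hprev, pvGoB, pvFst2]
      | cons c rest =>
        have hrest : rest.length ≤ n := by simp at hlen; omega
        by_cases hc : String.ofList [c] = leter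
        · -- new block starts at c
          have hstep : pvStepA leter (bc, bo, bl, prev) c = (bc, bo, 1, c) := by
            have hne : c ≠ prev := fun h => hprev (h ▸ hc)
            simp [pvStepA, hc, hne]
          have hok' : String.ofList ['.'] = leter →
              ∃ d, rest.getLast? = some d ∧ ¬ String.ofList [d] = leter := by
            intro hs
            rcases hok hs with h | ⟨d, hd, hdn⟩
            · exact absurd h (by simp)
            · cases rest with
              | nil =>
                simp at hd
                exact absurd hc (hd ▸ hdn)
              | cons y r => exact ⟨d, by simpa using hd, hdn⟩
          have hm := (ih rest hrest).2 bc bo 1 c hc hok'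
          rw [List.cons_append, List.foldl_cons, hstep, hm]
          rw [pvGoB]
          simp only [hc, if_true]
        · -- c non-matching: state unchanged, skip on B's side
          have hstep : pvStepA leter (bc, bo, bl, prev) c = (bc, bo, bl, c) := by
            simp [pvStepA, hc, hprev]
          have hok' : String.ofList ['.'] = leter →
              rest = [] ∨ ∃ d, rest.getLast? = some d ∧ ¬ String.ofList [d] = leter := by
            intro hs
            cases rest with
            | nil => exact Or.inl rfl
            | cons y r =>
              rcases hok hs with h | ⟨d, hd, hdn⟩
              · exact absurd h (by simp)
              · exact Or.inr ⟨d, by simpa using hd, hdn⟩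
          have hn := (ih rest hrest).1 bc bo bl c hc hok'
          rw [List.cons_append, List.foldl_cons, hstep, hn, pv_skip leter c rest bc bo hc]
    · -- M part
      intro bc bo k c hc hok
      cases cs with
      | nil =>
        have hs : ¬ String.ofList ['.'] = leter := by
          intro hs; rcases hok hs with ⟨d, hd, _⟩; simp at hd
        simp [pvStepA, hs, hc, pvGoB, pvFst2]
      | cons x r2 =>
        have hr2 : r2.length ≤ n := by simp at hlen; omega
        by_cases hx : x = c
        · -- run continues
          subst hx
          have hstep : pvStepA leter (bc, bo, k, x) x = (bc, bo, k + 1, x) := by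
            simp [pvStepA, hc]
          have hok' : String.ofList ['.'] = leter →
              ∃ d, r2.getLast? = some d ∧ ¬ String.ofList [d] = leter := by
            intro hs
            rcases hok hs with ⟨d, hd, hdn⟩
            cases r2 with
            | nil => simp at hd; exact absurd hc (hd ▸ hdn)
            | cons y r => exact ⟨d, by simpa using hd, hdn⟩
          have hm := (ih r2 hr2).2 bc bo (k + 1) x hc hok'
          rw [List.cons_append, List.foldl_cons, hstep, hm]
          rw [List.dropWhile_cons_of_pos (by simp), List.takeWhile_cons_of_pos (by simp)]
          congr 1
          rw [PySem.Int.mod_eq_emod_of_pos (by norm_num), PySem.Int.mod_eq_emod_of_pos (by norm_num)]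
          simp only [List.length_cons]
          push_cast
          omega
        · -- run ends at x: block closes
          have hxn : ¬ String.ofList [x] = leter := fun h => hx (pv_mk_inj (h.trans hc.symm))
          have hstep : pvStepA leter (bc, bo, k, c) x =
              (bc + 1, bo + PySem.Int.mod k 2, 0, x) := by
            simp [pvStepA, hxn, hc]
          have hok' : String.ofList ['.'] = leter →
              r2 = [] ∨ ∃ d, r2.getLast? = some d ∧ ¬ String.ofList [d] = leter := by
            intro hs
            cases r2 with
            | nil => exact Or.inl rfl
            | cons y r =>
              rcases hok hs with ⟨d, hd, hdn⟩
              exact Or.inr ⟨d, by simpa using hd, hdn⟩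
          have hn := (ih r2 hr2).1 (bc + 1) (bo + PySem.Int.mod k 2) 0 x hxn hok'
          rw [List.cons_append, List.foldl_cons, hstep, hn]
          have hbx : (x == c) = false := by simp [hx]
          rw [List.dropWhile_cons_of_neg (by simp [hbx]), List.takeWhile_cons_of_neg (by simp [hbx])]
          rw [pv_skip leter x r2 (bc + 1) (bo + PySem.Int.mod (k + (([] : List Char).length : Int)) 2) hxn]
          congr 1
          simp

-- "bad" joint induction inside D_: the sentinel matches leter and the word's trailing block
-- merges with it, so A's block_count is B's minus one (first components; o' arbitrary since
-- the first component of pvGoB does not depend on the odd accumulator).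
theorem pv_bad (leter : String) (hs : String.ofList ['.'] = leter) :
    ∀ (n : Nat) (cs : List Char), cs.length ≤ n →
    (∀ (bc bo bl o' : Int) (prev : Char), ¬ String.ofList [prev] = leter →
      (∃ d, cs.getLast? = some d ∧ String.ofList [d] = leter) →
      ((cs ++ ['.']).foldl (pvStepA leter) (bc, bo, bl, prev)).1 =
        (pvGoB leter cs bc o').1 - 1)
    ∧ (∀ (bc bo k o' : Int) (c : Char), String.ofList [c] = leter →
      (cs = [] ∨ ∃ d, cs.getLast? = some d ∧ String.ofList [d] = leter) →
      ((cs ++ ['.']).foldl (pvStepA leter) (bc, bo, k, c)).1 =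
        (pvGoB leter (cs.dropWhile (fun x => x == c)) (bc + 1) o').1 - 1) := by
  intro n
  induction n with
  | zero =>
    intro cs hlen
    have : cs = [] := List.eq_nil_of_length_eq_zero (Nat.le_zero.mp hlen)
    subst this
    constructor
    · intro bc bo bl o' prev _ hbad
      rcases hbad with ⟨d, hd, _⟩; simp at hd
    · intro bc bo k o' c hc _
      -- sentinel equals the matching prev: run merges, nothing closes
      have hdc : ('.' : Char) = c := pv_mk_inj (hs.trans hc.symm)
      simp [pvStepA, hs, hdc.symm, pvGoB]
  | succ n ih =>
    intro cs hlen
    constructor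
    · intro bc bo bl o' prev hprev hbad
      cases cs with
      | nil => rcases hbad with ⟨d, hd, _⟩; simp at hd
      | cons c rest =>
        have hrest : rest.length ≤ n := by simp at hlen; omega
        by_cases hc : String.ofList [c] = leter
        · have hne : c ≠ prev := fun h => hprev (h ▸ hc)
          have hstep : pvStepA leter (bc, bo, bl, prev) c = (bc, bo, 1, c) := by
            simp [pvStepA, hc, hne]
          have hbad' : rest = [] ∨ ∃ d, rest.getLast? = some d ∧ String.ofList [d] = leter := by
            cases rest with
            | nil => exact Or.inl rfl
            | cons y r =>
              rcases hbad with ⟨d, hd, hdm⟩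
              exact Or.inr ⟨d, by simpa using hd, hdm⟩
          rw [List.cons_append, List.foldl_cons, hstep, pvGoB]
          simp only [hc, if_true]
          exact (ih rest hrest).2 bc bo 1 _ c hc hbad'
        · have hstep : pvStepA leter (bc, bo, bl, prev) c = (bc, bo, bl, c) := by
            simp [pvStepA, hc, hprev]
          have hbad' : ∃ d, rest.getLast? = some d ∧ String.ofList [d] = leter := by
            cases rest with
            | nil =>
              rcases hbad with ⟨d, hd, hdm⟩
              simp at hd
              exact absurd (hd ▸ hdm) hc
            | cons y r =>
              rcases hbad with ⟨d, hd, hdm⟩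
              exact ⟨d, by simpa using hd, hdm⟩
          rw [List.cons_append, List.foldl_cons, hstep, pv_skip leter c rest bc o' hc]
          exact (ih rest hrest).1 bc bo bl o' c hc hbad'
    · intro bc bo k o' c hc hbad
      cases cs with
      | nil =>
        have hdc : ('.' : Char) = c := pv_mk_inj (hs.trans hc.symm)
        simp [pvStepA, hs, hdc.symm, pvGoB]
      | cons x r2 =>
        have hr2 : r2.length ≤ n := by simp at hlen; omega
        by_cases hx : x = c
        · subst hx
          have hstep : pvStepA leter (bc, bo, k, x) x = (bc, bo, k + 1, x) := by
            simp [pvStepA, hc]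
          have hbad' : r2 = [] ∨ ∃ d, r2.getLast? = some d ∧ String.ofList [d] = leter := by
            cases r2 with
            | nil => exact Or.inl rfl
            | cons y r =>
              rcases hbad with h | ⟨d, hd, hdm⟩
              · exact absurd h (by simp)
              · exact Or.inr ⟨d, by simpa using hd, hdm⟩
          rw [List.cons_append, List.foldl_cons, hstep,
            List.dropWhile_cons_of_pos (by simp)]
          exact (ih r2 hr2).2 bc bo (k + 1) o' x hc hbad'
        · have hxn : ¬ String.ofList [x] = leter := fun h => hx (pv_mk_inj (h.trans hc.symm))
          have hstep : pvStepA leter (bc, bo, k, c) x =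
              (bc + 1, bo + PySem.Int.mod k 2, 0, x) := by
            simp [pvStepA, hxn, hc]
          have hbad' : ∃ d, r2.getLast? = some d ∧ String.ofList [d] = leter := by
            cases r2 with
            | nil =>
              rcases hbad with h | ⟨d, hd, hdm⟩
              · exact absurd h (by simp)
              · simp at hd
                exact absurd (hd ▸ hdm) hxn
            | cons y r =>
              rcases hbad with h | ⟨d, hd, hdm⟩
              · exact absurd h (by simp)
              · exact ⟨d, by simpa using hd, hdm⟩
          have hbx : (x == c) = false := by simp [hx]
          rw [List.cons_append, List.foldl_cons, hstep,
            List.dropWhile_cons_of_neg (by simp [hbx]),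
            pv_skip leter x r2 (bc + 1) o' hxn]
          exact (ih r2 hr2).1 (bc + 1) (bo + PySem.Int.mod k 2) 0 o' x hxn hbad'

-- structural equations for the two ports on a non-empty word
theorem pvA_cons (leter : String) (p : Char) (rest : List Char) (word : String)
    (hw : word.toList = p :: rest) :
    count_blocks_by_leter word leter =
      (((rest ++ ['.']).foldl (pvStepA leter) (0, 0, if String.ofList [p] = leter then 1 else 0, p)).1,
       ((rest ++ ['.']).foldl (pvStepA leter) (0, 0, if String.ofList [p] = leter then 1 else 0, p)).2.1,
       ((rest ++ ['.']).foldl (pvStepA leter) (0, 0, if String.ofList [p] = leter then 1 else 0, p)).1 -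
       ((rest ++ ['.']).foldl (pvStepA leter) (0, 0, if String.ofList [p] = leter then 1 else 0, p)).2.1) := by
  unfold count_blocks_by_leter
  rw [hw]

theorem pvB_eq (leter : String) (word : String) :
    count_blocks_by_leter_alt word leter =
      ((pvGoB leter word.toList 0 0).1, (pvGoB leter word.toList 0 0).2,
       (pvGoB leter word.toList 0 0).1 - (pvGoB leter word.toList 0 0).2) := rfl

-- ===== VERDICT (by name: the statement is the Claim_ definition above) =====
theorem count_blocks_by_leter_spec : Claim_unchanged_count_blocks_by_leter := by
  unfold Claim_unchanged_count_blocks_by_leter Spec_count_blocks_by_leter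
  intro word leter _hdom hnd
  unfold count_blocks_by_leter count_blocks_by_leter_alt
  cases hw : word.toList with
  | nil => simp [pvGoB]
  | cons p rest =>
    have hlast : String.ofList ['.'] = leter → word.toList.getLast? ≠ some '.' := by
      intro hs h
      exact hnd ⟨by rw [← hs], h⟩
    by_cases hp : String.ofList [p] = leter
    · have hok : String.ofList ['.'] = leter →
          ∃ d, rest.getLast? = some d ∧ ¬ String.ofList [d] = leter := by
        intro hs
        have hlast' := hlast hs
        rw [hw] at hlast'
        cases rest with
        | nil =>
          exfalso
          have hpd : p = '.' := pv_mk_inj (hp.trans hs.symm)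
          simp [hpd] at hlast'
        | cons y r =>
          obtain ⟨d, hd⟩ := Option.isSome_iff_exists.mp ((List.getLast?_isSome (l := y :: r)).mpr (by simp))
          refine ⟨d, hd, fun hdm => ?_⟩
          have hdd : d = '.' := pv_mk_inj (hdm.trans hs.symm)
          apply hlast'
          rw [List.getLast?_cons_cons, hd, hdd]
      have hm := (pv_main leter rest.length rest le_rfl).2 0 0 1 p hp hok
      have hA1 : ((rest ++ ['.']).foldl (pvStepA leter) (0, 0, 1, p)).1 =
          (pvGoB leter (rest.dropWhile (fun x => x == p)) (0 + 1)
            (0 + PySem.Int.mod (1 + ((rest.takeWhile (fun x => x == p)).length : Int)) 2)).1 :=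
        congrArg Prod.fst hm
      have hA2 : ((rest ++ ['.']).foldl (pvStepA leter) (0, 0, 1, p)).2.1 =
          (pvGoB leter (rest.dropWhile (fun x => x == p)) (0 + 1)
            (0 + PySem.Int.mod (1 + ((rest.takeWhile (fun x => x == p)).length : Int)) 2)).2 :=
        congrArg Prod.snd hm
      simp only [hp, if_true]
      rw [pvGoB]
      simp only [hp, if_true, Prod.mk.injEq]
      exact ⟨hA1, hA2, by rw [hA1, hA2]⟩
    · have hok : String.ofList ['.'] = leter →
          rest = [] ∨ ∃ d, rest.getLast? = some d ∧ ¬ String.ofList [d] = leter := by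
        intro hs
        cases rest with
        | nil => exact Or.inl rfl
        | cons y r =>
          have hlast' := hlast hs
          rw [hw] at hlast'
          obtain ⟨d, hd⟩ := Option.isSome_iff_exists.mp ((List.getLast?_isSome (l := y :: r)).mpr (by simp))
          refine Or.inr ⟨d, hd, fun hdm => ?_⟩
          have hdd : d = '.' := pv_mk_inj (hdm.trans hs.symm)
          apply hlast'
          rw [List.getLast?_cons_cons, hd, hdd]
      have hn := (pv_main leter rest.length rest le_rfl).1 0 0 0 p hp hok
      have hA1 : ((rest ++ ['.']).foldl (pvStepA leter) (0, 0, 0, p)).1 =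
          (pvGoB leter rest 0 0).1 := congrArg Prod.fst hn
      have hA2 : ((rest ++ ['.']).foldl (pvStepA leter) (0, 0, 0, p)).2.1 =
          (pvGoB leter rest 0 0).2 := congrArg Prod.snd hn
      simp only [hp, if_false]
      rw [pv_skip leter p rest 0 0 hp, Prod.mk.injEq, Prod.mk.injEq]
      exact ⟨hA1, hA2, by rw [hA1, hA2]⟩

theorem count_blocks_by_leter_tight : Claim_exact_count_blocks_by_leter := by
  unfold Claim_exact_count_blocks_by_leter
  intro word leter _hdom hD
  obtain ⟨hl, hlast⟩ := hD
  subst hl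
  have hs : String.ofList ['.'] = "." := rfl
  intro heq
  cases hw : word.toList with
  | nil => rw [hw] at hlast; simp at hlast
  | cons p rest =>
    rw [hw] at hlast
    rw [pvA_cons "." p rest word hw, pvB_eq, hw] at heq
    have h1 := congrArg (fun t : Int × Int × Int => t.1) heq
    simp only at h1
    by_cases hp : String.ofList [p] = ("." : String)
    · rw [if_pos hp] at h1
      have hbad : rest = [] ∨ ∃ d, rest.getLast? = some d ∧ String.ofList [d] = ("." : String) := by
        cases rest with
        | nil => exact Or.inl rfl
        | cons y r =>
          obtain ⟨d, hd⟩ := Option.isSome_iff_exists.mp ((List.getLast?_isSome (l := y :: r)).mpr (by simp))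
          have hdd : d = '.' := by
            have h := hlast
            rw [List.getLast?_cons_cons, hd] at h
            exact Option.some_inj.mp h
          exact Or.inr ⟨d, hd, by rw [hdd]⟩
      rw [pvGoB] at h1
      simp only [hp, if_true] at h1
      rw [(pv_bad ("." : String) hs rest.length rest le_rfl).2 0 0 1
          (0 + PySem.Int.mod (1 + ((rest.takeWhile (fun x => x == p)).length : Int)) 2) p hp hbad] at h1
      omega
    · rw [if_neg hp] at h1
      have hbad : ∃ d, rest.getLast? = some d ∧ String.ofList [d] = ("." : String) := by
        cases rest with
        | nil =>
          simp at hlast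
          exact absurd (by rw [hlast]) hp
        | cons y r =>
          obtain ⟨d, hd⟩ := Option.isSome_iff_exists.mp ((List.getLast?_isSome (l := y :: r)).mpr (by simp))
          have hdd : d = '.' := by
            have h := hlast
            rw [List.getLast?_cons_cons, hd] at h
            exact Option.some_inj.mp h
          exact ⟨d, hd, by rw [hdd]⟩
      rw [pv_skip ("." : String) p rest 0 0 hp] at h1
      rw [(pv_bad ("." : String) hs rest.length rest le_rfl).1 0 0 0 0 p hp hbad] at h1
      omega

theorem count_blocks_by_leter_changed : Claim_changed_count_blocks_by_leter := by
  unfold Claim_changed_count_blocks_by_leter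
  refine ⟨by decide, by decide, by decide, ?_, by decide⟩
  show count_blocks_by_leter_alt "." "." = (1, 1, 0)
  have h : ("." : String).toList = ['.'] := rfl
  simp [count_blocks_by_leter_alt, h, pvGoB, PySem.Int.mod]
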